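-- pv_equiv track=rewrite | github.com/kepkin/mkdocs-dataview-plugin | src/mkdocs_dataview/markdown_db/md_renderer.py | split_inline_query
-- ===== SOURCE A (Python) =====
-- def split_inline_query(line):
--     """splits linke into text and ticks part"""
--     i = 0
--
--     while i <= len(line):
--         next_l = line.find("`", i)
--         if next_l == -1:
--             yield line[i:]
--             return
--
--         next_r = line.find("`", next_l + 1)
--         if next_r == -1:
--             yield line[i:]
--             return
--
--         yield line[i:next_l]
--         yield line[next_l:next_r+1]
--         i = next_r+1
-- ===== SOURCE B (Python) =====
-- def split_inline_query(line):
--     """splits linke into text and ticks part"""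
--     text = ""
--     tick = None  # None = outside backticks; else the pending '`...' run
--     for ch in line:
--         if tick is None:
--             if ch == "`":
--                 tick = "`"
--             else:
--                 text += ch
--         else:
--             tick += ch
--             if ch == "`":
--                 yield text
--                 yield tick
--                 text = ""
--                 tick = None
--     if tick is None:
--         yield text
--     else:
--         yield text + tick
-- ===== Notes on version B (the rewrite author's own statement) =====
-- stated objective: alternative
-- what changed: Replaced the repeated str.find scans with index bookkeeping and slicing by a single left-to-right character pass that keeps a text buffer and a pending backtick-run state, yielding segments as they close.
import Mathlib
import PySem

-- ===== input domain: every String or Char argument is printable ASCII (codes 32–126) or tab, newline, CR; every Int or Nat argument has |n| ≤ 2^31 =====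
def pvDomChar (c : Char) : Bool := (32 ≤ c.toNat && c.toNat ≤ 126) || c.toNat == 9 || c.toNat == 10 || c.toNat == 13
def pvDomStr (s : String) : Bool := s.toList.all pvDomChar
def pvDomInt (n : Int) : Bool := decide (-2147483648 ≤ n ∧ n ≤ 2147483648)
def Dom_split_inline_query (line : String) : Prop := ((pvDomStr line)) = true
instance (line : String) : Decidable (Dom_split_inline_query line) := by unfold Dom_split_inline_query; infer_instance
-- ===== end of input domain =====

-- B replaces A's repeated str.find scans + slicing by a single left-to-right character pass
-- with a text buffer and a pending backtick-run state (alternative decomposition, same cost).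

-- ===== PORT A =====
-- A's while-loop: i scans left to right, line.find("`", i) twice per step; the fuel argument only
-- totalizes the loop (i strictly increases each iteration, so line.length + 2 steps always suffice).
def pvALoop : Nat → List Char → Int → List String
  | 0, _, _ => []
  | fuel + 1, s, i =>
    if i ≤ (s.length : Int) then
      let next_l := PySem.Chars.findFrom s ['`'] i
      if next_l = -1 then
        [String.ofList (PySem.Chars.slice s (some i) none)]
      else
        let next_r := PySem.Chars.findFrom s ['`'] (next_l + 1)
        if next_r = -1 then
          [String.ofList (PySem.Chars.slice s (some i) none)]
        else
          String.ofList (PySem.Chars.slice s (some i) (some next_l)) ::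
          String.ofList (PySem.Chars.slice s (some next_l) (some (next_r + 1))) ::
          pvALoop fuel s (next_r + 1)
    else []

def split_inline_query (line : String) : List String :=
  pvALoop (line.toList.length + 2) line.toList 0

-- ===== PORT B =====
-- B's for-loop over the characters: `text` buffer; `tick` = none outside backticks / some pending run.
def pvBLoop : List Char → List Char → Option (List Char) → List String
  | [], text, none => [String.ofList text]
  | [], text, some tick => [String.ofList (text ++ tick)]
  | c :: rest, text, none =>
    if c = '`' then pvBLoop rest text (some ['`'])
    else pvBLoop rest (text ++ [c]) none
  | c :: rest, text, some tick =>
    if c = '`' then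
      String.ofList text :: String.ofList (tick ++ [c]) :: pvBLoop rest [] none
    else pvBLoop rest text (some (tick ++ [c]))

def split_inline_query_alt (line : String) : List String :=
  pvBLoop line.toList [] none

-- ===== PRECONDITION & SPEC =====
def Spec_split_inline_query (line : String) (out : List String) : Prop := out = split_inline_query_alt line
instance (line : String) (out : List String) : Decidable (Spec_split_inline_query line out) := by unfold Spec_split_inline_query; infer_instance

-- ===== CLAIM (what is proved, stated in full; the proofs are below) =====
def Claim_equal_split_inline_query : Prop := ∀ (line : String), Dom_split_inline_query line → Spec_split_inline_query line (split_inline_query line)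

-- ===== LEMMAS AND PROOFS =====

theorem pv_tick_infix (s : List Char) : ['`'] <:+: s ↔ '`' ∈ s := by
  constructor
  · intro h; exact List.singleton_sublist.mp h.sublist
  · intro h
    obtain ⟨u, v, rfl⟩ := List.append_of_mem h
    exact ⟨u, v, by simp⟩

-- the first '`' of d sits right after the takeWhile prefix
theorem pv_split (d : List Char) (h : '`' ∈ d) :
    d.dropWhile (fun c => c ≠ '`') = d.drop (d.takeWhile (fun c => c ≠ '`')).length
    ∧ d.drop (d.takeWhile (fun c => c ≠ '`')).length
        = '`' :: d.drop ((d.takeWhile (fun c => c ≠ '`')).length + 1)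
    ∧ (d.takeWhile (fun c => c ≠ '`')).length < d.length
    ∧ d.take (d.takeWhile (fun c => c ≠ '`')).length = d.takeWhile (fun c => c ≠ '`') := by
  induction d with
  | nil => simp at h
  | cons c t ih =>
    by_cases hc : c = '`'
    · subst hc
      simp
    · have hm : '`' ∈ t := by
        rcases List.mem_cons.mp h with h' | h'
        · exact absurd h'.symm hc
        · exact h'
      obtain ⟨i1, i2, i3, i4⟩ := ih hm
      refine ⟨?_, ?_, ?_, ?_⟩
      · simpa [hc] using i1
      · simpa [hc] using i2
      · have e : List.takeWhile (fun c => c ≠ '`') (c :: t)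
            = c :: List.takeWhile (fun c => c ≠ '`') t := by
          simp [hc]
        rw [e, List.length_cons, List.length_cons]
        omega
      · simpa [hc] using i4

theorem pv_find_tick (d : List Char) :
    PySem.Chars.find d ['`']
      = if '`' ∈ d then (((d.takeWhile (fun c => c ≠ '`')).length : Nat) : Int) else -1 := by
  by_cases h : '`' ∈ d
  · rw [if_pos h]
    obtain ⟨hdw, hdrop, hlt, htake⟩ := pv_split d h
    set f := (d.takeWhile (fun c => c ≠ '`')).length with hf
    have hnn : 0 ≤ PySem.Chars.find d ['`'] :=
      (PySem.Chars.find_nonneg_iff _ _).mpr ((pv_tick_infix d).mpr h)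
    obtain ⟨hpre, hmin⟩ := PySem.Chars.find_spec hnn
    set k := (PySem.Chars.find d ['`']).toNat with hk
    have h1 : ['`'] <+: d.drop f := by rw [hdrop]; exact ⟨_, rfl⟩
    have h2 : ∀ i, i < f → ¬ ['`'] <+: d.drop i := by
      intro i hif hcontra
      obtain ⟨t, ht⟩ := hcontra
      have hhd : (d.drop i).head? = some '`' := by rw [← ht]; rfl
      rw [List.head?_drop] at hhd
      have hmem : '`' ∈ d.takeWhile (fun c => c ≠ '`') := by
        apply List.mem_of_getElem? (i := i)
        rw [← htake, List.getElem?_take, if_pos hif]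
        exact hhd
      have := List.mem_takeWhile_imp hmem
      simp at this
    have hkf : k = f := by
      rcases lt_trichotomy k f with hc | hc | hc
      · exact absurd hpre (h2 k hc)
      · exact hc
      · exact absurd h1 (hmin f hc)
    rw [← Int.toNat_of_nonneg hnn, ← hk, hkf]
  · rw [if_neg h]
    exact (PySem.Chars.find_eq_neg_one_iff _ _).mpr (fun hc => h ((pv_tick_infix d).mp hc))

theorem pvB_none_nomem (s : List Char) (text : List Char) (h : '`' ∉ s) :
    pvBLoop s text none = [String.ofList (text ++ s)] := by
  induction s generalizing text with
  | nil => simp [pvBLoop]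
  | cons c rest ih =>
    have hc : c ≠ '`' := fun hcc => h (hcc ▸ List.mem_cons_self)
    rw [pvBLoop, if_neg hc, ih _ (fun hm => h (List.mem_cons_of_mem _ hm))]
    simp

theorem pvB_none_mem (s : List Char) (text : List Char) (h : '`' ∈ s) :
    pvBLoop s text none
      = pvBLoop (s.drop ((s.takeWhile (fun c => c ≠ '`')).length + 1))
          (text ++ s.takeWhile (fun c => c ≠ '`')) (some ['`']) := by
  induction s generalizing text with
  | nil => simp at h
  | cons c rest ih =>
    by_cases hc : c = '`'
    · subst hc
      rw [pvBLoop, if_pos rfl]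
      simp
    · have hm : '`' ∈ rest := by
        rcases List.mem_cons.mp h with h' | h'
        · exact absurd h'.symm hc
        · exact h'
      rw [pvBLoop, if_neg hc, ih _ hm]
      simp [hc, List.drop_succ_cons]

theorem pvB_some_nomem (s : List Char) (text tick : List Char) (h : '`' ∉ s) :
    pvBLoop s text (some tick) = [String.ofList (text ++ (tick ++ s))] := by
  induction s generalizing tick with
  | nil => simp [pvBLoop]
  | cons c rest ih =>
    have hc : c ≠ '`' := fun hcc => h (hcc ▸ List.mem_cons_self)
    rw [pvBLoop, if_neg hc, ih _ (fun hm => h (List.mem_cons_of_mem _ hm))]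
    simp

theorem pvB_some_mem (s : List Char) (text tick : List Char) (h : '`' ∈ s) :
    pvBLoop s text (some tick)
      = String.ofList text
        :: String.ofList (tick ++ s.takeWhile (fun c => c ≠ '`') ++ ['`'])
        :: pvBLoop (s.drop ((s.takeWhile (fun c => c ≠ '`')).length + 1)) [] none := by
  induction s generalizing tick with
  | nil => simp at h
  | cons c rest ih =>
    by_cases hc : c = '`'
    · subst hc
      rw [pvBLoop, if_pos rfl]
      simp
    · have hm : '`' ∈ rest := by
        rcases List.mem_cons.mp h with h' | h'
        · exact absurd h'.symm hc
        · exact h'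
      rw [pvBLoop, if_neg hc, ih _ hm]
      simp [hc, List.drop_succ_cons]

theorem pv_main (fuel : Nat) : ∀ (s : List Char) (i : Nat), i ≤ s.length → s.length - i < fuel →
    pvALoop fuel s (i : Int) = pvBLoop (s.drop i) [] none := by
  induction fuel with
  | zero => intro s i h1 h2; omega
  | succ F ih =>
    intro s i h1 h2
    have hcond : (i : Int) ≤ (s.length : Int) := by exact_mod_cast h1
    rw [pvALoop, if_pos hcond, PySem.Chars.findFrom_natCast s ['`'] i h1]
    have hdlen : (s.drop i).length = s.length - i := List.length_drop ..
    by_cases hmem : '`' ∈ s.drop i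
    · obtain ⟨hdw, hdrop, hlt, htake⟩ := pv_split (s.drop i) hmem
      set f := ((s.drop i).takeWhile (fun c => c ≠ '`')).length with hff
      have hfind : PySem.Chars.find (s.drop i) ['`'] = ((f : Nat) : Int) := by
        rw [pv_find_tick, if_pos hmem]
      rw [hfind]
      have hne1 : ¬ (((f : Nat) : Int) = -1) := by omega
      rw [if_neg hne1]
      simp only []
      rw [if_neg (by omega : ¬ ((i : Int) + (f : Int) = -1))]
      have hcast1 : ((i : Int) + (f : Int) + 1) = (((i + f + 1 : Nat)) : Int) := by push_cast; ring
      have hifb : i + f + 1 ≤ s.length := by omega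
      rw [hcast1, PySem.Chars.findFrom_natCast s ['`'] (i + f + 1) hifb]
      have hdd : s.drop (i + f + 1) = (s.drop i).drop (f + 1) := by
        rw [List.drop_drop]
        have : i + (f + 1) = i + f + 1 := by omega
        rw [this]
      rw [hdd]
      by_cases hmem' : '`' ∈ (s.drop i).drop (f + 1)
      · obtain ⟨hdw', hdrop', hlt', htake'⟩ := pv_split ((s.drop i).drop (f + 1)) hmem'
        set g := (((s.drop i).drop (f + 1)).takeWhile (fun c => c ≠ '`')).length with hgg
        have hfind' : PySem.Chars.find ((s.drop i).drop (f + 1)) ['`'] = ((g : Nat) : Int) := by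
          rw [pv_find_tick, if_pos hmem']
        rw [hfind']
        have hne2 : ¬ (((g : Nat) : Int) = -1) := by omega
        rw [if_neg hne2]
        rw [if_neg (by push_cast; omega : ¬ (((i + f + 1 : Nat) : Int) + (g : Int) = -1))]
        -- the three pieces
        have hgb : g < s.length - i - (f + 1) := by
          have := hlt'
          rw [List.length_drop, hdlen] at this
          omega
        -- slice s i (i+f) = takeWhile prefix
        have hsliceA : PySem.Chars.slice s (some (i : Int)) (some ((i : Int) + (f : Int)))
            = (s.drop i).takeWhile (fun c => c ≠ '`') := by
          rw [PySem.Chars.slice_eq_listSlice]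
          have : ((i : Int) + (f : Int)) = (((i + f : Nat)) : Int) := by push_cast; ring
          rw [this, PySem.List.slice_natCast]
          have : i + f - i = f := by omega
          rw [this, htake]
        -- slice s (i+f) (i+f+g+2) = '`' :: tW' ++ ['`']
        have hsliceB : PySem.Chars.slice s (some ((i : Int) + (f : Int)))
              (some (((i + f + 1 : Nat) : Int) + (g : Int) + 1))
            = '`' :: ((((s.drop i).drop (f + 1)).takeWhile (fun c => c ≠ '`')) ++ ['`']) := by
          rw [PySem.Chars.slice_eq_listSlice]
          have e1 : ((i : Int) + (f : Int)) = (((i + f : Nat)) : Int) := by push_cast; ring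
          have e2 : (((i + f + 1 : Nat) : Int) + (g : Int) + 1) = (((i + f + g + 2 : Nat)) : Int) := by
            push_cast; ring
          rw [e1, e2, PySem.List.slice_natCast]
          have e3 : i + f + g + 2 - (i + f) = g + 2 := by omega
          have e4 : s.drop (i + f) = (s.drop i).drop f := by rw [List.drop_drop]
          rw [e3, e4, hdrop]
          -- take (g+2) ('`' :: d') = '`' :: d'.take (g+1)
          have e5 : (((s.drop i).drop (f + 1)).take (g + 1))
              = (((s.drop i).drop (f + 1)).takeWhile (fun c => c ≠ '`')) ++ ['`'] := by
            rw [List.take_add_one, htake']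
            have : (((s.drop i).drop (f + 1))[g]?) = some '`' := by
              rw [← List.head?_drop, hdrop']
              rfl
            rw [this]
            rfl
          have e6 : g + 2 = (g + 1) + 1 := rfl
          rw [e6, List.take_succ_cons, e5]
        rw [hsliceA, hsliceB]
        -- the recursive call
        have hcast2 : (((i + f + 1 : Nat) : Int) + (g : Int) + 1) = (((i + f + g + 2 : Nat)) : Int) := by
          push_cast; ring
        rw [hcast2, ih s (i + f + g + 2) (by omega) (by omega)]
        have hdd2 : s.drop (i + f + g + 2) = ((s.drop i).drop (f + 1)).drop (g + 1) := by
          rw [List.drop_drop, List.drop_drop]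
          have : i + (f + 1 + (g + 1)) = i + f + g + 2 := by omega
          rw [this]
        rw [hdd2]
        -- now the RHS
        rw [pvB_none_mem _ _ hmem, pvB_some_mem _ _ _ hmem']
        simp only [List.nil_append, List.cons_append]
        rw [← hgg]
      · have hfind' : PySem.Chars.find ((s.drop i).drop (f + 1)) ['`'] = -1 := by
          rw [pv_find_tick, if_neg hmem']
        rw [hfind', if_pos rfl, if_pos rfl]
        rw [PySem.Chars.slice_eq_listSlice, PySem.List.slice_from_natCast]
        rw [pvB_none_mem _ _ hmem, pvB_some_nomem _ _ _ hmem']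
        have e : s.drop i = (s.drop i).takeWhile (fun c => c ≠ '`')
            ++ ('`' :: (s.drop i).drop (f + 1)) := by
          conv_lhs => rw [← List.takeWhile_append_dropWhile (p := fun c => c ≠ '`') (l := s.drop i)]
          rw [hdw, hdrop]
        conv_lhs => rw [e]
        simp
    · have hfind : PySem.Chars.find (s.drop i) ['`'] = -1 := by
        rw [pv_find_tick, if_neg hmem]
      rw [hfind, if_pos rfl]
      rw [PySem.Chars.slice_eq_listSlice, PySem.List.slice_from_natCast]
      rw [pvB_none_nomem _ _ hmem]
      simp

-- ===== VERDICT (by name: the statement is the Claim_ definition above) =====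
theorem split_inline_query_spec : Claim_equal_split_inline_query := by
  intro line _
  unfold Spec_split_inline_query split_inline_query split_inline_query_alt
  have h := pv_main (line.toList.length + 2) line.toList 0 (by omega) (by omega)
  simpa using h
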